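-- pv_equiv track=rewrite | github.com/DewPeaceTigers/AlgorithmStudy | weeks/week_54/PG_92344/jeongmin.py | solution
-- ===== SOURCE A (Python) =====
-- def solution(board, skill):
--     answer = 0
--
--     # 행, 열의 길이
--     N, M = len(board), len(board[0])
--
--     # 누적합 계산을 위한 배열
--     calc_arr = [[0]*(M+1) for _ in range(N+1)]
--
--     for t, r1, c1, r2, c2, degree in skill:
--         """
--         (r1, c1) ~ (r2, c2) 까지에 degree만큼의 변화를 주고 싶다면
--
--             (r1, c1)   =  degree, (r1, c2+1)   = -degree,
--             (r2+1, c1) = -degree, (r2+1, c2+1) =  degree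
--
--         만큼의 값을 더해주면 원하는 부분에 원하는 변화량만큼 값을 바꿀 수 있음
--         """
--         # 내구도 낮추기
--         if t == 1:
--             degree *= -1
--
--         calc_arr[r1][c1] += degree
--         calc_arr[r1][c2+1] -= degree
--         calc_arr[r2+1][c1] -= degree
--         calc_arr[r2+1][c2+1] += degree
--
--     # 계산한 배열을 오른쪽으로 누적합
--     for r in range(N):
--         for c in range(1, M):
--             calc_arr[r][c] = calc_arr[r][c-1] + calc_arr[r][c]
--
--     # 계산한 배열을 아래쪽으로 누적합
--     for c in range(M):
--         for r in range(1, N):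
--             calc_arr[r][c] = calc_arr[r-1][c] + calc_arr[r][c]
--
--     # 기존 배열에 누적합 더하기
--     for r in range(N):
--         for c in range(M):
--             board[r][c] += calc_arr[r][c]
--
--             # 계산한 값이 1 이상이면 파괴되지 않은 건물
--             if board[r][c] >= 1:
--                 answer += 1
--
--     return answer
-- ===== SOURCE B (Python) =====
-- def solution(board, skill):
--     # Direct application: add each skill's delta over its rectangle, then count the
--     # N x M grid cells that are >= 1.  (Mutates board in place, like A; the final
--     # values of the counted cells equal A's.)
--     N, M = len(board), len(board[0])
--     for t, r1, c1, r2, c2, degree in skill: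
--         d = -degree if t == 1 else degree
--         for r in range(r1, r2 + 1):
--             for c in range(c1, c2 + 1):
--                 board[r][c] += d
--     return sum(1 for r in range(N) for c in range(M) if board[r][c] >= 1)
-- ===== Notes on version B (the rewrite author's own statement) =====
-- stated objective: simpler
-- what changed: Drops the 2-D difference (imos) array and its two prefix-sum passes: B adds each skill's delta directly over its rectangle and then counts cells >= 1 in one pass.
-- outside the precondition, e.g. on solution([[1, 1, 1], [1, 1, 1], [1, 1, 1]], [[2, 2, 0, 0, 2, 1]]): A returns 6, B returns 9; on solution([[1, 1, 1], [1, 1, 1], [1, 1, 1]], [[1, -1, 0, -1, 0, 2]]): A returns 9, B returns 8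
import Mathlib
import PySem

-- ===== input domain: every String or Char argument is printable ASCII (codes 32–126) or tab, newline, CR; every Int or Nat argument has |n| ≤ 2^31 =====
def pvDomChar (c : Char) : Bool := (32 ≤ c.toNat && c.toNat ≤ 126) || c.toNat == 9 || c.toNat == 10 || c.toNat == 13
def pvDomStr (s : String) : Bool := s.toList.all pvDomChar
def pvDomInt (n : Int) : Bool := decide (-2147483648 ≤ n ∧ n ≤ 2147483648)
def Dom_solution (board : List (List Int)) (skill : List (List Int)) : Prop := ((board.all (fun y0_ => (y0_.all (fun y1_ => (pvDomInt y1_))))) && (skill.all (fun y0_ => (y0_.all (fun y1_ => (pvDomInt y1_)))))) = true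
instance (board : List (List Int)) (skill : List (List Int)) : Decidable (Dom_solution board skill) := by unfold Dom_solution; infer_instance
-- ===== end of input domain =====

-- B drops A's 2-D difference array and its two prefix-sum passes and instead adds each skill's
-- delta directly over its rectangle, then counts surviving cells in one pass (objective: simpler;
-- not faster). Both Pythons mutate `board` in place (to the same final values); the equivalence
-- proved here is about the RETURN value.

-- ===== PORT A =====
-- shared Python-semantics helpers for both ports:
-- a[r][c] read with default (all reads in both ports are in range under Pre_solution),
-- a[r][c] = v, and a[r][c] += d with Python index semantics (negative indices wrap;
-- out-of-range raises IndexError in Python, excluded by Pre_solution, modelled as a no-op).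
def get2 (a : List (List Int)) (r c : Nat) : Int := (a.getD r []).getD c 0
def setAt2 (a : List (List Int)) (r c : Nat) (v : Int) : List (List Int) :=
  a.modify r (fun row => row.set c v)
def pyWrap (i : Int) (n : Nat) : Int := if i < 0 then i + n else i
def pyAdjAt (a : List (List Int)) (r c d : Int) : List (List Int) :=
  if 0 ≤ pyWrap r a.length ∧ pyWrap r a.length < (a.length : Int) then
    if 0 ≤ pyWrap c (a.getD (pyWrap r a.length).toNat []).length ∧
       pyWrap c (a.getD (pyWrap r a.length).toNat []).length <
         ((a.getD (pyWrap r a.length).toNat []).length : Int) then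
      setAt2 a (pyWrap r a.length).toNat
        (pyWrap c (a.getD (pyWrap r a.length).toNat []).length).toNat
        (get2 a (pyWrap r a.length).toNat
          (pyWrap c (a.getD (pyWrap r a.length).toNat []).length).toNat + d)
    else a
  else a
def skillStepA (a : List (List Int)) (s : List Int) : List (List Int) :=
  match s with
  | [t, r1, c1, r2, c2, degree] =>
    let d := if t = 1 then -degree else degree
    pyAdjAt (pyAdjAt (pyAdjAt (pyAdjAt a r1 c1 d) r1 (c2+1) (-d)) (r2+1) c1 (-d)) (r2+1) (c2+1) d
  | _ => a
def skillStepB (b : List (List Int)) (s : List Int) : List (List Int) :=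
  match s with
  | [t, r1, c1, r2, c2, degree] =>
    let d := if t = 1 then -degree else degree
    (PySem.List.pyRange r1 (r2+1) 1).foldl (fun b r =>
      (PySem.List.pyRange c1 (c2+1) 1).foldl (fun b c => pyAdjAt b r c d) b) b
  | _ => b

def solution (board : List (List Int)) (skill : List (List Int)) : Int :=
  let N := board.length
  let M := (board.getD 0 []).length  -- board[0]; IndexError on empty board, excluded by Pre_solution
  let calc0 := List.replicate (N+1) (List.replicate (M+1) (0:Int))
  let calc1 := skill.foldl skillStepA calc0
  -- row prefix pass: for r in range(N): for c in range(1, M)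
  let calc2 := (List.range N).foldl (fun a r =>
      (List.range' 1 (M-1)).foldl (fun a c => setAt2 a r c (get2 a r (c-1) + get2 a r c)) a) calc1
  -- column prefix pass: for c in range(M): for r in range(1, N)
  let calc3 := (List.range M).foldl (fun a c =>
      (List.range' 1 (N-1)).foldl (fun a r => setAt2 a r c (get2 a (r-1) c + get2 a r c)) a) calc2
  -- final pass: board[r][c] += calc[r][c]; count cells >= 1
  let st := (List.range N).foldl (fun (st : List (List Int) × Int) r =>
      (List.range M).foldl (fun st c =>
        let b := setAt2 st.1 r c (get2 st.1 r c + get2 calc3 r c)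
        (b, st.2 + if 1 ≤ get2 b r c then 1 else 0)) st) (board, 0)
  st.2

-- ===== PORT B =====
def solution_alt (board : List (List Int)) (skill : List (List Int)) : Int :=
  let N := board.length
  let M := (board.getD 0 []).length  -- board[0]; IndexError on empty board, excluded by Pre_solution
  let b := skill.foldl skillStepB board
  (List.range N).foldl (fun ans r =>
    (List.range M).foldl (fun ans c => ans + if 1 ≤ get2 b r c then 1 else 0) ans) 0

-- ===== PRECONDITION & SPEC =====
-- Pre_ restricts to the problem's natural domain: a nonempty board whose rows all have at least
-- len(board[0]) columns (only the first len(board[0]) are counted) and skills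
-- [t,r1,c1,r2,c2,degree] whose corners are in range and ordered (r1 ≤ r2, c1 ≤ c2).  Outside it
-- A raises (empty board, short skill rows, out-of-range indices) or returns accidental values
-- (negative indices wrap; an inverted rectangle makes the difference array apply stray deltas).
def Pre_solution (board : List (List Int)) (skill : List (List Int)) : Prop :=
  board ≠ [] ∧
  (∀ row ∈ board, (board.getD 0 []).length ≤ row.length) ∧
  (∀ s ∈ skill, s.length = 6 ∧
     0 ≤ s.getD 1 0 ∧ s.getD 1 0 ≤ s.getD 3 0 ∧ s.getD 3 0 < (board.length : Int) ∧
     0 ≤ s.getD 2 0 ∧ s.getD 2 0 ≤ s.getD 4 0 ∧ s.getD 4 0 < ((board.getD 0 []).length : Int))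

instance (board : List (List Int)) (skill : List (List Int)) : Decidable (Pre_solution board skill) := by
  unfold Pre_solution; infer_instance

def pvWitness_solution : List (List Int) × List (List Int) :=
  ([[1, 2], [0, -1]], [[1, 0, 0, 1, 1, 1], [2, 0, 1, 1, 1, 3]])

def Spec_solution (board : List (List Int)) (skill : List (List Int)) (out : Int) : Prop := out = solution_alt board skill
instance (board : List (List Int)) (skill : List (List Int)) (out : Int) : Decidable (Spec_solution board skill out) := by unfold Spec_solution; infer_instance

-- ===== CLAIM (what is proved, stated in full; the proofs are below) =====
def Claim_equal_solution : Prop := ∀ (board : List (List Int)) (skill : List (List Int)), Dom_solution board skill → Pre_solution board skill → Spec_solution board skill (solution board skill)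

-- ===== LEMMAS AND PROOFS =====
-- n rows, each of length at least m (board rows may be longer; the calc arrays are exact)
def Shaped (a : List (List Int)) (n m : Nat) : Prop :=
  a.length = n ∧ ∀ r : Nat, r < n → m ≤ (a.getD r []).length

theorem shaped_setAt2 {a : List (List Int)} {n m : Nat} (h : Shaped a n m) (r c : Nat) (v : Int) :
    Shaped (setAt2 a r c v) n m := by
  obtain ⟨h1, h2⟩ := h
  refine ⟨by simp [setAt2, h1], fun r' hr' => ?_⟩
  have hlt : r' < a.length := by omega
  obtain ⟨row, hh⟩ : ∃ row, a[r']? = some row := ⟨a[r'], List.getElem?_eq_getElem hlt⟩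
  have hlen := h2 r' hr'
  simp only [List.getD_eq_getElem?_getD, hh, Option.getD_some] at hlen
  simp only [setAt2, List.getD_eq_getElem?_getD, List.getElem?_modify, hh, Option.map_some]
  by_cases he : r = r' <;> simp [he, List.length_set, hlen]

theorem get2_setAt2 {a : List (List Int)} {r c : Nat} (hr : r < a.length)
    (hc : c < (a.getD r []).length) (v : Int) (r' c' : Nat) :
    get2 (setAt2 a r c v) r' c' = if r' = r ∧ c' = c then v else get2 a r' c' := by
  by_cases he : r = r'
  · subst he
    obtain ⟨row, hh⟩ : ∃ row, a[r]? = some row := ⟨a[r], List.getElem?_eq_getElem hr⟩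
    have hc' : c < row.length := by
      simpa only [List.getD_eq_getElem?_getD, hh, Option.getD_some] using hc
    simp only [get2, setAt2, List.getD_eq_getElem?_getD, List.getElem?_modify, hh,
      Option.map_some, if_pos rfl, Option.getD_some, List.getElem?_set]
    by_cases hce : c = c'
    · subst hce; simp [hc']
    · have : ¬(c' = c) := fun h => hce h.symm
      simp [hce, this]
  · have hne : ¬(r' = r ∧ c' = c) := fun ⟨h1, _⟩ => he h1.symm
    rw [if_neg hne]
    simp only [get2, setAt2, List.getD_eq_getElem?_getD, List.getElem?_modify]
    cases hh : a[r']? <;> simp [hh, he]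




theorem pyWrap_of_nonneg {i : Int} (h : 0 ≤ i) (n : Nat) : pyWrap i n = i := by
  simp [pyWrap, not_lt.mpr h]

theorem pyAdjAt_eq {a : List (List Int)} {n m : Nat} (h : Shaped a n m) {r c : Int}
    (hr0 : 0 ≤ r) (hrn : r < (n : Int)) (hc0 : 0 ≤ c) (hcm : c < (m : Int)) (d : Int) :
    pyAdjAt a r c d = setAt2 a r.toNat c.toNat (get2 a r.toNat c.toNat + d) := by
  obtain ⟨h1, h2⟩ := h
  have hrow : m ≤ (a.getD r.toNat []).length := h2 r.toNat (by omega)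
  rw [pyAdjAt, pyWrap_of_nonneg hr0, pyWrap_of_nonneg hc0, if_pos (by omega),
    if_pos (by omega)]

theorem shaped_pyAdjAt {a : List (List Int)} {n m : Nat} (h : Shaped a n m) (r c d : Int) :
    Shaped (pyAdjAt a r c d) n m := by
  rw [pyAdjAt]
  split
  · split
    · exact shaped_setAt2 h _ _ _
    · exact h
  · exact h

theorem get2_pyAdjAt {a : List (List Int)} {n m : Nat} (h : Shaped a n m) {r c : Int}
    (hr0 : 0 ≤ r) (hrn : r < (n : Int)) (hc0 : 0 ≤ c) (hcm : c < (m : Int)) (d : Int)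
    {r' c' : Nat} (hr' : r' < n) (hc' : c' < m) :
    get2 (pyAdjAt a r c d) r' c' = get2 a r' c' + (if (r' : Int) = r ∧ (c' : Int) = c then d else 0) := by
  rw [pyAdjAt_eq h hr0 hrn hc0 hcm,
    get2_setAt2 (by rw [h.1]; omega) (by have := h.2 r.toNat (by omega); omega)]
  by_cases hx : (r' : Int) = r ∧ (c' : Int) = c
  · have e1 : r' = r.toNat := by omega
    have e2 : c' = c.toNat := by omega
    subst e1; subst e2
    rw [if_pos ⟨rfl, rfl⟩, if_pos hx]
  · have hne : ¬(r' = r.toNat ∧ c' = c.toNat) := by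
      intro ⟨e1, e2⟩; exact hx ⟨by omega, by omega⟩
    rw [if_neg hne, if_neg hx]; ring

-- sums over List.range
def sumR (n : Nat) (f : Nat → Int) : Int := ((List.range n).map f).sum

theorem sumR_zero (f : Nat → Int) : sumR 0 f = 0 := rfl
theorem sumR_succ (n : Nat) (f : Nat → Int) : sumR (n+1) f = sumR n f + f n := by
  simp [sumR, List.range_succ]
theorem sumR_congr {n : Nat} {f g : Nat → Int} (h : ∀ i, i < n → f i = g i) : sumR n f = sumR n g := by
  unfold sumR
  congr 1
  exact List.map_congr_left (fun i hi => h i (List.mem_range.mp hi))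
theorem sumR_add (n : Nat) (f g : Nat → Int) :
    sumR n (fun i => f i + g i) = sumR n f + sumR n g := by
  induction n with
  | zero => rfl
  | succ k ih => simp only [sumR_succ, ih]; ring
theorem sumR_const_zero (n : Nat) : sumR n (fun _ => (0:Int)) = 0 := by
  induction n with
  | zero => rfl
  | succ k ih => simp [sumR_succ, ih]
theorem sumR_mul_left (n : Nat) (a : Int) (f : Nat → Int) :
    sumR n (fun i => a * f i) = a * sumR n f := by
  induction n with
  | zero => simp [sumR_zero]
  | succ k ih => simp only [sumR_succ, ih]; ring
theorem sumR_sub (n : Nat) (f g : Nat → Int) :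
    sumR n (fun i => f i - g i) = sumR n f - sumR n g := by
  induction n with
  | zero => rfl
  | succ k ih => simp only [sumR_succ, ih]; ring

theorem foldl_add_extract {α : Type} (l : List α) (f : α → Int) (a0 : Int) :
    l.foldl (fun a v => a + f v) a0 = a0 + (l.map f).sum := by
  induction l generalizing a0 with
  | nil => simp
  | cons x tl ih => simp [ih]; ring

-- skill abstractions
def dOf (s : List Int) : Int := if s.getD 0 0 = 1 then -(s.getD 5 0) else s.getD 5 0
def eff (s : List Int) (r c : Nat) : Int :=
  if s.getD 1 0 ≤ (r:Int) ∧ (r:Int) ≤ s.getD 3 0 ∧ s.getD 2 0 ≤ (c:Int) ∧ (c:Int) ≤ s.getD 4 0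
  then dOf s else 0
def delta (s : List Int) (r c : Nat) : Int :=
  dOf s * ((if (r:Int) = s.getD 1 0 then 1 else 0) - (if (r:Int) = s.getD 3 0 + 1 then 1 else 0))
        * ((if (c:Int) = s.getD 2 0 then 1 else 0) - (if (c:Int) = s.getD 4 0 + 1 then 1 else 0))
def ValidS (n m : Nat) (s : List Int) : Prop :=
  s.length = 6 ∧ 0 ≤ s.getD 1 0 ∧ s.getD 1 0 ≤ s.getD 3 0 ∧ s.getD 3 0 < (n:Int) ∧
  0 ≤ s.getD 2 0 ∧ s.getD 2 0 ≤ s.getD 4 0 ∧ s.getD 4 0 < (m:Int)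

theorem len6_destruct (s : List Int) (h : s.length = 6) :
    ∃ t r1 c1 r2 c2 g, s = [t, r1, c1, r2, c2, g] := by
  match s, h with
  | [t, r1, c1, r2, c2, g], _ => exact ⟨t, r1, c1, r2, c2, g, rfl⟩

theorem ite_and_mul (p q : Prop) [Decidable p] [Decidable q] (d : Int) :
    (if p ∧ q then d else 0) = (if p then (1:Int) else 0) * (if q then (1:Int) else 0) * d := by
  by_cases hp : p <;> by_cases hq : q <;> simp [hp, hq]


theorem shaped_skillStepA {a : List (List Int)} {n m : Nat} (h : Shaped a n m) (s : List Int) :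
    Shaped (skillStepA a s) n m := by
  unfold skillStepA
  split
  · exact shaped_pyAdjAt (shaped_pyAdjAt (shaped_pyAdjAt (shaped_pyAdjAt h _ _ _) _ _ _) _ _ _) _ _ _
  · exact h

theorem get2_skillStepA {a : List (List Int)} {n m : Nat} (h : Shaped a (n+1) (m+1))
    {s : List Int} (hs : ValidS n m s) {r c : Nat} (hr : r < n+1) (hc : c < m+1) :
    get2 (skillStepA a s) r c = get2 a r c + delta s r c := by
  obtain ⟨hlen, hv⟩ := hs
  obtain ⟨t, r1, c1, r2, c2, g, rfl⟩ := len6_destruct _ hlen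
  simp only [List.getD_cons_succ, List.getD_cons_zero] at hv
  obtain ⟨h1, h2, h3, h4, h5, h6⟩ := hv
  have hA1 := shaped_pyAdjAt h r1 c1 (if t = 1 then -g else g)
  have hA2 := shaped_pyAdjAt hA1 r1 (c2+1) (-(if t = 1 then -g else g))
  have hA3 := shaped_pyAdjAt hA2 (r2+1) c1 (-(if t = 1 then -g else g))
  show get2 (pyAdjAt _ _ _ _) r c = _
  rw [get2_pyAdjAt hA3 (by omega) (by push_cast; omega) (by omega) (by push_cast; omega) _ hr hc,
      get2_pyAdjAt hA2 (by omega) (by push_cast; omega) (by omega) (by push_cast; omega) _ hr hc,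
      get2_pyAdjAt hA1 (by omega) (by push_cast; omega) (by omega) (by push_cast; omega) _ hr hc,
      get2_pyAdjAt h (by omega) (by push_cast; omega) (by omega) (by push_cast; omega) _ hr hc]
  simp only [delta, dOf, List.getD_cons_succ, List.getD_cons_zero]
  rw [ite_and_mul, ite_and_mul, ite_and_mul, ite_and_mul]
  ring

theorem get2_foldA {n m : Nat} (skill : List (List Int))
    (hs : ∀ s ∈ skill, ValidS n m s) {a : List (List Int)} (h : Shaped a (n+1) (m+1))
    {r c : Nat} (hr : r < n+1) (hc : c < m+1) :
    get2 (skill.foldl skillStepA a) r c = get2 a r c + (skill.map (fun s => delta s r c)).sum := by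
  induction skill generalizing a with
  | nil => simp
  | cons s tl ih =>
    simp only [List.foldl_cons, List.map_cons, List.sum_cons]
    rw [ih (fun x hx => hs x (List.mem_cons_of_mem _ hx)) (shaped_skillStepA h s),
      get2_skillStepA h (hs s List.mem_cons_self) hr hc]
    ring

theorem shaped_foldA {n m : Nat} (skill : List (List Int)) {a : List (List Int)}
    (h : Shaped a n m) : Shaped (skill.foldl skillStepA a) n m := by
  induction skill generalizing a with
  | nil => exact h
  | cons s tl ih => exact ih (shaped_skillStepA h s)


theorem get2_foldB_inner {n m : Nat} (cs : List Int) (hcs : ∀ x ∈ cs, 0 ≤ x ∧ x < (m:Int))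
    (hnd : cs.Nodup) {rI d : Int} (hr0 : 0 ≤ rI) (hrn : rI < (n:Int))
    {b : List (List Int)} (h : Shaped b n m) {r c : Nat} (hr : r < n) (hc : c < m) :
    get2 (cs.foldl (fun b c => pyAdjAt b rI c d) b) r c
      = get2 b r c + (if (r:Int) = rI ∧ (c:Int) ∈ cs then d else 0) := by
  induction cs generalizing b with
  | nil => simp
  | cons x tl ih =>
    have hx := hcs x List.mem_cons_self
    simp only [List.foldl_cons]
    rw [ih (fun y hy => hcs y (List.mem_cons_of_mem _ hy)) hnd.of_cons
        (shaped_pyAdjAt h _ _ _),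
      get2_pyAdjAt h hr0 hrn hx.1 hx.2 _ hr hc]
    by_cases hm : (r:Int) = rI ∧ (c:Int) = x
    · have hnotl : ¬((c:Int) ∈ tl) := by rw [hm.2]; exact (List.nodup_cons.mp hnd).1
      rw [if_pos hm, if_neg (fun hh => hnotl hh.2), if_pos ⟨hm.1, by rw [hm.2]; exact List.mem_cons_self⟩]
      ring
    · rw [if_neg hm]
      by_cases hm2 : (r:Int) = rI ∧ (c:Int) ∈ tl
      · rw [if_pos hm2, if_pos ⟨hm2.1, List.mem_cons_of_mem _ hm2.2⟩]; ring
      · rw [if_neg hm2, if_neg (fun hh => ?_)]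
        · ring
        · rcases List.mem_cons.mp hh.2 with h1 | h1
          · exact hm ⟨hh.1, h1⟩
          · exact hm2 ⟨hh.1, h1⟩

theorem shaped_foldB_inner {n m : Nat} (cs : List Int) {rI d : Int}
    {b : List (List Int)} (h : Shaped b n m) :
    Shaped (cs.foldl (fun b c => pyAdjAt b rI c d) b) n m := by
  induction cs generalizing b with
  | nil => exact h
  | cons x tl ih => exact ih (shaped_pyAdjAt h _ _ _)

theorem shaped_foldB_outer {n m : Nat} (rs cs : List Int) {d : Int}
    {b : List (List Int)} (h : Shaped b n m) :
    Shaped (rs.foldl (fun b rI => cs.foldl (fun b c => pyAdjAt b rI c d) b) b) n m := by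
  induction rs generalizing b with
  | nil => exact h
  | cons x tl ih => exact ih (shaped_foldB_inner cs h)

theorem get2_foldB_outer {n m : Nat} (rs : List Int) (hrs : ∀ x ∈ rs, 0 ≤ x ∧ x < (n:Int))
    (hnd : rs.Nodup) (cs : List Int) (hcs : ∀ x ∈ cs, 0 ≤ x ∧ x < (m:Int)) (hcnd : cs.Nodup)
    {d : Int} {b : List (List Int)} (h : Shaped b n m) {r c : Nat} (hr : r < n) (hc : c < m) :
    get2 (rs.foldl (fun b rI => cs.foldl (fun b c => pyAdjAt b rI c d) b) b) r c
      = get2 b r c + (if (r:Int) ∈ rs ∧ (c:Int) ∈ cs then d else 0) := by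
  induction rs generalizing b with
  | nil => simp
  | cons x tl ih =>
    have hx := hrs x List.mem_cons_self
    simp only [List.foldl_cons]
    rw [ih (fun y hy => hrs y (List.mem_cons_of_mem _ hy)) hnd.of_cons
        (shaped_foldB_inner cs h),
      get2_foldB_inner cs hcs hcnd hx.1 hx.2 h hr hc]
    by_cases hm : (r:Int) = x ∧ (c:Int) ∈ cs
    · have hnotl : ¬((r:Int) ∈ tl) := by rw [hm.1]; exact (List.nodup_cons.mp hnd).1
      rw [if_pos hm, if_neg (fun hh => hnotl hh.1),
        if_pos ⟨by rw [hm.1]; exact List.mem_cons_self, hm.2⟩]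
      ring
    · rw [if_neg hm]
      by_cases hm2 : (r:Int) ∈ tl ∧ (c:Int) ∈ cs
      · rw [if_pos hm2, if_pos ⟨List.mem_cons_of_mem _ hm2.1, hm2.2⟩]; ring
      · rw [if_neg hm2, if_neg (fun hh => ?_)]
        · ring
        · rcases List.mem_cons.mp hh.1 with h1 | h1
          · exact hm ⟨h1, hh.2⟩
          · exact hm2 ⟨h1, hh.2⟩

theorem shaped_skillStepB {b : List (List Int)} {n m : Nat} (h : Shaped b n m) (s : List Int) :
    Shaped (skillStepB b s) n m := by
  unfold skillStepB
  split
  · exact shaped_foldB_outer _ _ h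
  · exact h

theorem get2_skillStepB {n m : Nat} {b : List (List Int)} (h : Shaped b n m)
    {s : List Int} (hs : ValidS n m s) {r c : Nat} (hr : r < n) (hc : c < m) :
    get2 (skillStepB b s) r c = get2 b r c + eff s r c := by
  obtain ⟨hlen, hv⟩ := hs
  obtain ⟨t, r1, c1, r2, c2, g, rfl⟩ := len6_destruct _ hlen
  simp only [List.getD_cons_succ, List.getD_cons_zero] at hv
  obtain ⟨h1, h2, h3, h4, h5, h6⟩ := hv
  show get2 (List.foldl _ b _) r c = _
  rw [get2_foldB_outer (PySem.List.pyRange r1 (r2+1) 1)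
      (fun x hx => by have := (PySem.List.mem_pyRange_one).mp hx; omega)
      (PySem.List.nodup_pyRange_one _ _)
      (PySem.List.pyRange c1 (c2+1) 1)
      (fun x hx => by have := (PySem.List.mem_pyRange_one).mp hx; omega)
      (PySem.List.nodup_pyRange_one _ _) h hr hc]
  simp only [eff, PySem.List.mem_pyRange_one, dOf, List.getD_cons_succ, List.getD_cons_zero]
  by_cases hin : r1 ≤ (r:Int) ∧ (r:Int) ≤ r2 ∧ c1 ≤ (c:Int) ∧ (c:Int) ≤ c2
  · rw [if_pos (by omega), if_pos hin]
  · rw [if_neg (by omega), if_neg hin]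

theorem get2_foldB {n m : Nat} (skill : List (List Int))
    (hs : ∀ s ∈ skill, ValidS n m s) {b : List (List Int)} (h : Shaped b n m)
    {r c : Nat} (hr : r < n) (hc : c < m) :
    get2 (skill.foldl skillStepB b) r c = get2 b r c + (skill.map (fun s => eff s r c)).sum := by
  induction skill generalizing b with
  | nil => simp
  | cons s tl ih =>
    simp only [List.foldl_cons, List.map_cons, List.sum_cons]
    rw [ih (fun x hx => hs x (List.mem_cons_of_mem _ hx)) (shaped_skillStepB h s),
      get2_skillStepB h (hs s List.mem_cons_self) hr hc]
    ring

theorem countB_eq (b : List (List Int)) (N M : Nat) :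
    (List.range N).foldl (fun ans r =>
        (List.range M).foldl (fun ans c => ans + if 1 ≤ get2 b r c then 1 else 0) ans) 0
      = sumR N (fun r => sumR M (fun c => if 1 ≤ get2 b r c then (1:Int) else 0)) := by
  rw [show (fun ans r => (List.range M).foldl (fun ans c => ans + if 1 ≤ get2 b r c then (1:Int) else 0) ans)
      = fun ans r => ans + sumR M (fun c => if 1 ≤ get2 b r c then (1:Int) else 0) from
    funext fun ans => funext fun r => foldl_add_extract _ _ _]
  rw [foldl_add_extract, zero_add]
  rfl

-- telescoping
theorem sumR_indicator (t : Nat) (x : Int) :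
    sumR t (fun i => if (i:Int) = x then (1:Int) else 0)
      = if 0 ≤ x ∧ x < (t:Int) then 1 else 0 := by
  induction t with
  | zero => rw [sumR_zero, if_neg (by push_cast; omega)]
  | succ k ih =>
    rw [sumR_succ, ih]
    by_cases h1 : 0 ≤ x ∧ x < (k:Int)
    · rw [if_pos h1, if_neg (by omega), if_pos (by push_cast; omega)]; ring
    · by_cases h2 : (k:Int) = x
      · rw [if_neg h1, if_pos h2, if_pos (by push_cast; omega)]; ring
      · rw [if_neg h1, if_neg h2, if_neg (by push_cast; omega)]; ring

theorem sum2_delta {n m : Nat} {s : List Int} (hs : ValidS n m s) {r c : Nat}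
    (hr : r < n) (hc : c < m) :
    sumR (r+1) (fun i => sumR (c+1) (fun j => delta s i j)) = eff s r c := by
  obtain ⟨hlen, h1, h2, h3, h4, h5, h6⟩ := hs
  have hcol : sumR (c+1) (fun j => (if (j:Int) = s.getD 2 0 then (1:Int) else 0)
      - (if (j:Int) = s.getD 4 0 + 1 then (1:Int) else 0))
      = (if s.getD 2 0 ≤ (c:Int) then (1:Int) else 0) - (if s.getD 4 0 + 1 ≤ (c:Int) then 1 else 0) := by
    rw [sumR_sub, sumR_indicator, sumR_indicator]
    congr 1
    · by_cases hx : s.getD 2 0 ≤ (c:Int)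
      · rw [if_pos (by push_cast; omega), if_pos hx]
      · rw [if_neg (by push_cast; omega), if_neg hx]
    · by_cases hx : s.getD 4 0 + 1 ≤ (c:Int)
      · rw [if_pos (by push_cast; omega), if_pos hx]
      · rw [if_neg (by push_cast; omega), if_neg hx]
  have hstep : ∀ i : Nat, sumR (c+1) (fun j => delta s i j)
      = dOf s * ((if (i:Int) = s.getD 1 0 then (1:Int) else 0)
          - (if (i:Int) = s.getD 3 0 + 1 then 1 else 0))
        * ((if s.getD 2 0 ≤ (c:Int) then (1:Int) else 0)
          - (if s.getD 4 0 + 1 ≤ (c:Int) then 1 else 0)) := by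
    intro i
    unfold delta
    rw [sumR_mul_left, hcol]
  calc sumR (r+1) (fun i => sumR (c+1) (fun j => delta s i j))
      = sumR (r+1) (fun i => ((if s.getD 2 0 ≤ (c:Int) then (1:Int) else 0)
          - (if s.getD 4 0 + 1 ≤ (c:Int) then 1 else 0)) * dOf s
        * ((if (i:Int) = s.getD 1 0 then (1:Int) else 0)
          - (if (i:Int) = s.getD 3 0 + 1 then 1 else 0))) := by
        apply sumR_congr; intro i _; rw [hstep i]; ring
    _ = ((if s.getD 2 0 ≤ (c:Int) then (1:Int) else 0)
          - (if s.getD 4 0 + 1 ≤ (c:Int) then 1 else 0)) * dOf s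
        * ((if s.getD 1 0 ≤ (r:Int) then (1:Int) else 0)
          - (if s.getD 3 0 + 1 ≤ (r:Int) then 1 else 0)) := by
        rw [sumR_mul_left]
        congr 1
        rw [sumR_sub, sumR_indicator, sumR_indicator]
        congr 1
        · by_cases hx : s.getD 1 0 ≤ (r:Int)
          · rw [if_pos (by push_cast; omega), if_pos hx]
          · rw [if_neg (by push_cast; omega), if_neg hx]
        · by_cases hx : s.getD 3 0 + 1 ≤ (r:Int)
          · rw [if_pos (by push_cast; omega), if_pos hx]
          · rw [if_neg (by push_cast; omega), if_neg hx]
    _ = eff s r c := by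
        unfold eff
        by_cases hin : s.getD 1 0 ≤ (r:Int) ∧ (r:Int) ≤ s.getD 3 0 ∧
            s.getD 2 0 ≤ (c:Int) ∧ (c:Int) ≤ s.getD 4 0
        · rw [if_pos hin]
          obtain ⟨a1, a2, a3, a4⟩ := hin
          split_ifs
          all_goals try ring
          all_goals exfalso; omega
        · rw [if_neg hin]
          split_ifs
          all_goals try ring
          all_goals exact absurd ⟨by omega, by omega, by omega, by omega⟩ hin

-- swap a sumR with a list-map sum
theorem sumR_swap_list {α : Type} (t : Nat) (l : List α) (g : α → Nat → Int) :
    sumR t (fun i => (l.map (fun s => g s i)).sum)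
      = (l.map (fun s => sumR t (fun i => g s i))).sum := by
  induction l with
  | nil => simpa using sumR_const_zero t
  | cons s tl ih =>
    simp only [List.map_cons, List.sum_cons, ← ih, ← sumR_add]

theorem range'_one_concat (k : Nat) : List.range' 1 (k+1) = List.range' 1 k ++ [k+1] := by
  rw [List.range'_concat]; norm_num [Nat.add_comm]

-- row-prefix scan over one row
theorem rowScan {N' M' : Nat} {a : List (List Int)} (h : Shaped a N' M') {r : Nat} (hr : r < N')
    (k : Nat) (hk : k < M') :
    Shaped ((List.range' 1 k).foldl (fun a c => setAt2 a r c (get2 a r (c-1) + get2 a r c)) a) N' M' ∧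
    (∀ c', c' ≤ k → get2 ((List.range' 1 k).foldl (fun a c => setAt2 a r c (get2 a r (c-1) + get2 a r c)) a) r c'
        = sumR (c'+1) (fun j => get2 a r j)) ∧
    (∀ r' c', r' ≠ r ∨ c' = 0 ∨ k < c' → get2 ((List.range' 1 k).foldl (fun a c => setAt2 a r c (get2 a r (c-1) + get2 a r c)) a) r' c'
        = get2 a r' c') := by
  induction k with
  | zero =>
    refine ⟨h, fun c' hc' => ?_, fun _ _ _ => rfl⟩
    interval_cases c'
    rw [sumR_succ, sumR_zero, zero_add]
    rfl
  | succ k ih =>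
    obtain ⟨ihS, ih2, ih3⟩ := ih (by omega)
    rw [range'_one_concat, List.foldl_append, List.foldl_cons, List.foldl_nil]
    have hset : ∀ r' c', get2 (setAt2 ((List.range' 1 k).foldl (fun a c => setAt2 a r c (get2 a r (c-1) + get2 a r c)) a) (r) (k+1)
        (get2 ((List.range' 1 k).foldl (fun a c => setAt2 a r c (get2 a r (c-1) + get2 a r c)) a) r (k+1-1)
          + get2 ((List.range' 1 k).foldl (fun a c => setAt2 a r c (get2 a r (c-1) + get2 a r c)) a) r (k+1))) r' c'
        = if r' = r ∧ c' = k+1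
          then get2 ((List.range' 1 k).foldl (fun a c => setAt2 a r c (get2 a r (c-1) + get2 a r c)) a) r (k+1-1)
            + get2 ((List.range' 1 k).foldl (fun a c => setAt2 a r c (get2 a r (c-1) + get2 a r c)) a) r (k+1)
          else get2 ((List.range' 1 k).foldl (fun a c => setAt2 a r c (get2 a r (c-1) + get2 a r c)) a) r' c' :=
      fun r' c' => get2_setAt2 (by rw [ihS.1]; omega) (by have := ihS.2 r (by omega); omega) _ r' c'
    refine ⟨shaped_setAt2 ihS _ _ _, fun c' hc' => ?_, fun r' c' hcond => ?_⟩
    · rw [hset]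
      by_cases he : c' = k+1
      · subst he
        rw [if_pos ⟨rfl, rfl⟩]
        have e1 : k+1-1 = k := by omega
        rw [e1, ih2 k (by omega), ih3 r (k+1) (by omega), sumR_succ (k+1), sumR_succ k]
      · rw [if_neg (by omega), ih2 c' (by omega)]
    · rw [hset, if_neg (by omega)]
      exact ih3 r' c' (by omega)

-- full row pass
theorem rowPassChar {n m : Nat} {a : List (List Int)} (h : Shaped a (n+1) (m+1))
    (t : Nat) :
    t ≤ n →
    Shaped ((List.range t).foldl (fun a r => (List.range' 1 (m-1)).foldl (fun a c => setAt2 a r c (get2 a r (c-1) + get2 a r c)) a) a) (n+1) (m+1) ∧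
    (∀ r' c', r' < t → c' < m → get2 ((List.range t).foldl (fun a r => (List.range' 1 (m-1)).foldl (fun a c => setAt2 a r c (get2 a r (c-1) + get2 a r c)) a) a) r' c'
        = sumR (c'+1) (fun j => get2 a r' j)) ∧
    (∀ r' c', t ≤ r' → get2 ((List.range t).foldl (fun a r => (List.range' 1 (m-1)).foldl (fun a c => setAt2 a r c (get2 a r (c-1) + get2 a r c)) a) a) r' c'
        = get2 a r' c') := by
  induction t with
  | zero => exact fun _ => ⟨h, fun _ _ h' _ => absurd h' (by omega), fun _ _ _ => rfl⟩
  | succ t ih =>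
    intro ht
    obtain ⟨ihS, ih2, ih3⟩ := ih (by omega)
    rw [List.range_succ, List.foldl_append, List.foldl_cons, List.foldl_nil]
    obtain ⟨sS, s2, s3⟩ := rowScan ihS (show t < n+1 by omega) (m-1) (by omega)
    refine ⟨sS, fun r' c' hr' hc' => ?_, fun r' c' hge => ?_⟩
    · by_cases he : r' = t
      · subst he
        by_cases hc0 : c' = 0
        · subst hc0
          rw [s3 r' 0 (by omega), ih3 r' 0 (by omega), sumR_succ, sumR_zero, zero_add]
        · rw [s2 c' (by omega)]
          exact sumR_congr (fun j hj => ih3 r' j (by omega))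
      · rw [s3 r' c' (by omega)]
        exact ih2 r' c' (by omega) hc'
    · rw [s3 r' c' (by omega)]
      exact ih3 r' c' (by omega)

-- column-prefix scan down one column
theorem colScan {N' M' : Nat} {a : List (List Int)} (h : Shaped a N' M') {cI : Nat} (hc : cI < M')
    (k : Nat) (hk : k < N') :
    Shaped ((List.range' 1 k).foldl (fun a r => setAt2 a r cI (get2 a (r-1) cI + get2 a r cI)) a) N' M' ∧
    (∀ r', r' ≤ k → get2 ((List.range' 1 k).foldl (fun a r => setAt2 a r cI (get2 a (r-1) cI + get2 a r cI)) a) r' cI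
        = sumR (r'+1) (fun i => get2 a i cI)) ∧
    (∀ r' c', c' ≠ cI ∨ r' = 0 ∨ k < r' → get2 ((List.range' 1 k).foldl (fun a r => setAt2 a r cI (get2 a (r-1) cI + get2 a r cI)) a) r' c'
        = get2 a r' c') := by
  induction k with
  | zero =>
    refine ⟨h, fun r' hr' => ?_, fun _ _ _ => rfl⟩
    interval_cases r'
    rw [sumR_succ, sumR_zero, zero_add]
    rfl
  | succ k ih =>
    obtain ⟨ihS, ih2, ih3⟩ := ih (by omega)
    rw [range'_one_concat, List.foldl_append, List.foldl_cons, List.foldl_nil]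
    have hset : ∀ r' c', get2 (setAt2 ((List.range' 1 k).foldl (fun a r => setAt2 a r cI (get2 a (r-1) cI + get2 a r cI)) a) (k+1) cI
        (get2 ((List.range' 1 k).foldl (fun a r => setAt2 a r cI (get2 a (r-1) cI + get2 a r cI)) a) (k+1-1) cI
          + get2 ((List.range' 1 k).foldl (fun a r => setAt2 a r cI (get2 a (r-1) cI + get2 a r cI)) a) (k+1) cI)) r' c'
        = if r' = k+1 ∧ c' = cI
          then get2 ((List.range' 1 k).foldl (fun a r => setAt2 a r cI (get2 a (r-1) cI + get2 a r cI)) a) (k+1-1) cI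
            + get2 ((List.range' 1 k).foldl (fun a r => setAt2 a r cI (get2 a (r-1) cI + get2 a r cI)) a) (k+1) cI
          else get2 ((List.range' 1 k).foldl (fun a r => setAt2 a r cI (get2 a (r-1) cI + get2 a r cI)) a) r' c' :=
      fun r' c' => get2_setAt2 (by rw [ihS.1]; omega) (by have := ihS.2 (k+1) (by omega); omega) _ r' c'
    refine ⟨shaped_setAt2 ihS _ _ _, fun r' hr' => ?_, fun r' c' hcond => ?_⟩
    · rw [hset]
      by_cases he : r' = k+1
      · subst he
        rw [if_pos ⟨rfl, rfl⟩]
        have e1 : k+1-1 = k := by omega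
        rw [e1, ih2 k (by omega), ih3 (k+1) cI (by omega), sumR_succ (k+1), sumR_succ k]
      · rw [if_neg (by omega), ih2 r' (by omega)]
    · rw [hset, if_neg (by omega)]
      exact ih3 r' c' (by omega)

-- full column pass
theorem colPassChar {n m : Nat} {a : List (List Int)} (h : Shaped a (n+1) (m+1))
    (t : Nat) :
    t ≤ m →
    Shaped ((List.range t).foldl (fun a c => (List.range' 1 (n-1)).foldl (fun a r => setAt2 a r c (get2 a (r-1) c + get2 a r c)) a) a) (n+1) (m+1) ∧
    (∀ r' c', c' < t → r' < n → get2 ((List.range t).foldl (fun a c => (List.range' 1 (n-1)).foldl (fun a r => setAt2 a r c (get2 a (r-1) c + get2 a r c)) a) a) r' c'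
        = sumR (r'+1) (fun i => get2 a i c')) ∧
    (∀ r' c', t ≤ c' → get2 ((List.range t).foldl (fun a c => (List.range' 1 (n-1)).foldl (fun a r => setAt2 a r c (get2 a (r-1) c + get2 a r c)) a) a) r' c'
        = get2 a r' c') := by
  induction t with
  | zero => exact fun _ => ⟨h, fun _ _ h' _ => absurd h' (by omega), fun _ _ _ => rfl⟩
  | succ t ih =>
    intro ht
    obtain ⟨ihS, ih2, ih3⟩ := ih (by omega)
    rw [List.range_succ, List.foldl_append, List.foldl_cons, List.foldl_nil]
    obtain ⟨sS, s2, s3⟩ := colScan ihS (show t < m+1 by omega) (n-1) (by omega)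
    refine ⟨sS, fun r' c' hc' hr' => ?_, fun r' c' hge => ?_⟩
    · by_cases he : c' = t
      · subst he
        by_cases hr0 : r' = 0
        · subst hr0
          rw [s3 0 c' (by omega), ih3 0 c' (by omega), sumR_succ, sumR_zero, zero_add]
        · rw [s2 r' (by omega)]
          exact sumR_congr (fun i hi => ih3 i c' (by omega))
      · rw [s3 r' c' (by omega)]
        exact ih2 r' c' (by omega) hr'
    · rw [s3 r' c' (by omega)]
      exact ih3 r' c' (by omega)

-- final counting loop of A, inner (one row)
theorem finInner {n m : Nat} (calc3 : List (List Int)) {r : Nat} (hr : r < n) (k : Nat) :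
    k ≤ m →
    ∀ st : List (List Int) × Int, Shaped st.1 n m →
    Shaped ((List.range k).foldl (fun st c => (setAt2 st.1 r c (get2 st.1 r c + get2 calc3 r c),
        st.2 + if 1 ≤ get2 (setAt2 st.1 r c (get2 st.1 r c + get2 calc3 r c)) r c then 1 else 0)) st).1 n m ∧
    ((List.range k).foldl (fun st c => (setAt2 st.1 r c (get2 st.1 r c + get2 calc3 r c),
        st.2 + if 1 ≤ get2 (setAt2 st.1 r c (get2 st.1 r c + get2 calc3 r c)) r c then 1 else 0)) st).2
      = st.2 + sumR k (fun c => if 1 ≤ get2 st.1 r c + get2 calc3 r c then 1 else 0) ∧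
    (∀ r' c', r' ≠ r ∨ k ≤ c' →
      get2 ((List.range k).foldl (fun st c => (setAt2 st.1 r c (get2 st.1 r c + get2 calc3 r c),
        st.2 + if 1 ≤ get2 (setAt2 st.1 r c (get2 st.1 r c + get2 calc3 r c)) r c then 1 else 0)) st).1 r' c'
      = get2 st.1 r' c') := by
  induction k with
  | zero =>
    intro _ st hS
    refine ⟨hS, by simp [sumR_zero], fun _ _ _ => rfl⟩
  | succ k ih =>
    intro hk st hS
    obtain ⟨ihS, ih2, ih3⟩ := ih (by omega) st hS
    rw [List.range_succ, List.foldl_append, List.foldl_cons, List.foldl_nil]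
    have hset := fun (v : Int) (r' c' : Nat) => get2_setAt2 (a :=
        ((List.range k).foldl (fun st c => (setAt2 st.1 r c (get2 st.1 r c + get2 calc3 r c),
          st.2 + if 1 ≤ get2 (setAt2 st.1 r c (get2 st.1 r c + get2 calc3 r c)) r c then 1 else 0)) st).1)
      (r := r) (c := k) (by rw [ihS.1]; omega) (by have := ihS.2 r hr; omega) v r' c'
    refine ⟨shaped_setAt2 ihS _ _ _, ?_, fun r' c' hcond => ?_⟩
    · have hvk : get2 (setAt2 ((List.range k).foldl (fun st c => (setAt2 st.1 r c (get2 st.1 r c + get2 calc3 r c),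
          st.2 + if 1 ≤ get2 (setAt2 st.1 r c (get2 st.1 r c + get2 calc3 r c)) r c then 1 else 0)) st).1 r k
            (get2 ((List.range k).foldl (fun st c => (setAt2 st.1 r c (get2 st.1 r c + get2 calc3 r c),
          st.2 + if 1 ≤ get2 (setAt2 st.1 r c (get2 st.1 r c + get2 calc3 r c)) r c then 1 else 0)) st).1 r k + get2 calc3 r k)) r k
          = get2 st.1 r k + get2 calc3 r k := by
        rw [hset, if_pos (show r = r ∧ k = k from ⟨rfl, rfl⟩), ih3 r k (Or.inr (le_refl k))]
      show _ + (if 1 ≤ get2 (setAt2 _ r k _) r k then (1:Int) else 0) = _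
      rw [hvk, ih2, sumR_succ]
      ring
    · show get2 (setAt2 _ r k _) r' c' = _
      rw [hset, if_neg (by omega)]
      exact ih3 r' c' (by omega)

-- final counting loop of A, all rows
theorem finOuter {n m : Nat} (calc3 : List (List Int)) (t : Nat) :
    t ≤ n →
    ∀ st : List (List Int) × Int, Shaped st.1 n m →
    Shaped ((List.range t).foldl (fun st r => (List.range m).foldl (fun st c =>
        (setAt2 st.1 r c (get2 st.1 r c + get2 calc3 r c),
         st.2 + if 1 ≤ get2 (setAt2 st.1 r c (get2 st.1 r c + get2 calc3 r c)) r c then 1 else 0)) st) st).1 n m ∧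
    ((List.range t).foldl (fun st r => (List.range m).foldl (fun st c =>
        (setAt2 st.1 r c (get2 st.1 r c + get2 calc3 r c),
         st.2 + if 1 ≤ get2 (setAt2 st.1 r c (get2 st.1 r c + get2 calc3 r c)) r c then 1 else 0)) st) st).2
      = st.2 + sumR t (fun r => sumR m (fun c => if 1 ≤ get2 st.1 r c + get2 calc3 r c then 1 else 0)) ∧
    (∀ r' c', t ≤ r' →
      get2 ((List.range t).foldl (fun st r => (List.range m).foldl (fun st c =>
        (setAt2 st.1 r c (get2 st.1 r c + get2 calc3 r c),
         st.2 + if 1 ≤ get2 (setAt2 st.1 r c (get2 st.1 r c + get2 calc3 r c)) r c then 1 else 0)) st) st).1 r' c'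
      = get2 st.1 r' c') := by
  induction t with
  | zero =>
    intro _ st hS
    refine ⟨hS, by simp [sumR_zero], fun _ _ _ => rfl⟩
  | succ t ih =>
    intro ht st hS
    obtain ⟨ihS, ih2, ih3⟩ := ih (by omega) st hS
    rw [List.range_succ, List.foldl_append, List.foldl_cons, List.foldl_nil]
    obtain ⟨fS, f2, f3⟩ := finInner calc3 (show t < n by omega) m (le_refl m) _ ihS
    refine ⟨fS, ?_, fun r' c' hge => ?_⟩
    · rw [f2, ih2, sumR_succ]
      have : sumR m (fun c => if 1 ≤ get2 ((List.range t).foldl (fun st r => (List.range m).foldl (fun st c =>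
          (setAt2 st.1 r c (get2 st.1 r c + get2 calc3 r c),
           st.2 + if 1 ≤ get2 (setAt2 st.1 r c (get2 st.1 r c + get2 calc3 r c)) r c then 1 else 0)) st) st).1 t c + get2 calc3 t c then (1:Int) else 0)
          = sumR m (fun c => if 1 ≤ get2 st.1 t c + get2 calc3 t c then (1:Int) else 0) :=
        sumR_congr (fun c hc => by rw [ih3 t c (by omega)])
      rw [this]
      ring
    · rw [f3 r' c' (by omega)]
      exact ih3 r' c' (by omega)

theorem shaped_calc0 (n m : Nat) :
    Shaped (List.replicate (n+1) (List.replicate (m+1) (0:Int))) (n+1) (m+1) := by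
  refine ⟨List.length_replicate, fun r hr => ?_⟩
  rw [List.getD_replicate _ hr, List.length_replicate]


theorem get2_calc0 (n m r c : Nat) :
    get2 (List.replicate n (List.replicate m (0:Int))) r c = 0 := by
  unfold get2
  by_cases hr : r < n
  · rw [List.getD_replicate _ hr]
    by_cases hc : c < m
    · rw [List.getD_replicate _ hc]
    · exact List.getD_eq_default _ _ (by rw [List.length_replicate]; omega)
  · have h1 : (List.replicate n (List.replicate m (0:Int))).getD r [] = [] :=
      List.getD_eq_default _ _ (by rw [List.length_replicate]; omega)
    rw [h1]
    rfl



theorem main_equiv (board skill : List (List Int))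
    (hrect : ∀ row ∈ board, (board.getD 0 []).length ≤ row.length)
    (hsk : ∀ s ∈ skill, s.length = 6 ∧
      0 ≤ s.getD 1 0 ∧ s.getD 1 0 ≤ s.getD 3 0 ∧ s.getD 3 0 < (board.length : Int) ∧
      0 ≤ s.getD 2 0 ∧ s.getD 2 0 ≤ s.getD 4 0 ∧ s.getD 4 0 < ((board.getD 0 []).length : Int)) :
    solution board skill = solution_alt board skill := by
  unfold solution solution_alt
  set n := board.length with hn
  set m := (board.getD 0 []).length with hm
  have hshape : Shaped board n m := ⟨rfl, fun r hr => by
    rw [List.getD_eq_getElem _ _ hr]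
    exact hrect _ (List.getElem_mem hr)⟩
  have hvalid : ∀ s ∈ skill, ValidS n m s := fun s hs => hsk s hs
  -- A side: reduce the final loop
  have hc0S := shaped_calc0 n m
  have hc1S : Shaped (skill.foldl skillStepA (List.replicate (n+1) (List.replicate (m+1) (0:Int)))) (n+1) (m+1) :=
    shaped_foldA skill hc0S
  obtain ⟨rS, r2, _⟩ := rowPassChar hc1S n (le_refl n)
  obtain ⟨cS, c2, _⟩ := colPassChar rS m (le_refl m)
  obtain ⟨_, f2, _⟩ := finOuter (n := n) (m := m) _ n (le_refl n) (board, 0) hshape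
  rw [f2]
  rw [countB_eq (skill.foldl skillStepB board) n m]
  rw [zero_add]
  apply sumR_congr
  intro r hrn
  apply sumR_congr
  intro c hcm
  have hB : get2 (skill.foldl skillStepB board) r c
      = get2 board r c + (skill.map (fun s => eff s r c)).sum :=
    get2_foldB skill hvalid hshape hrn hcm
  have hA : get2 ((List.range m).foldl (fun a c =>
        (List.range' 1 (n-1)).foldl (fun a r => setAt2 a r c (get2 a (r-1) c + get2 a r c)) a)
        ((List.range n).foldl (fun a r =>
        (List.range' 1 (m-1)).foldl (fun a c => setAt2 a r c (get2 a r (c-1) + get2 a r c)) a)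
        (skill.foldl skillStepA (List.replicate (n+1) (List.replicate (m+1) (0:Int)))))) r c
      = (skill.map (fun s => eff s r c)).sum := by
    rw [c2 r c hcm hrn]
    calc sumR (r+1) (fun i => get2 ((List.range n).foldl (fun a r =>
            (List.range' 1 (m-1)).foldl (fun a c => setAt2 a r c (get2 a r (c-1) + get2 a r c)) a)
            (skill.foldl skillStepA (List.replicate (n+1) (List.replicate (m+1) (0:Int))))) i c)
        = sumR (r+1) (fun i => sumR (c+1) (fun j =>
            get2 (skill.foldl skillStepA (List.replicate (n+1) (List.replicate (m+1) (0:Int)))) i j)) := by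
          exact sumR_congr (fun i hi => r2 i c (by omega) hcm)
      _ = sumR (r+1) (fun i => sumR (c+1) (fun j => (skill.map (fun s => delta s i j)).sum)) := by
          refine sumR_congr (fun i hi => sumR_congr (fun j hj => ?_))
          rw [get2_foldA skill hvalid hc0S (by omega) (by omega), get2_calc0, zero_add]
      _ = (skill.map (fun s => sumR (r+1) (fun i => sumR (c+1) (fun j => delta s i j)))).sum := by
          rw [← sumR_swap_list]
          exact sumR_congr (fun i hi => by rw [← sumR_swap_list])
      _ = (skill.map (fun s => eff s r c)).sum := by
          congr 1
          exact List.map_congr_left (fun s hs => sum2_delta (hvalid s hs) hrn hcm)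
  rw [hA, hB]

-- ===== VERDICT (by name: the statement is the Claim_ definition above) =====
theorem solution_spec : Claim_equal_solution := by
  intro board skill _ hpre
  unfold Spec_solution
  exact main_equiv board skill hpre.2.1 hpre.2.2
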